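-- pv_equiv track=rewrite | github.com/latent-spacecraft/freestyle | freestyle.py | merge_inputs
-- ===== SOURCE A (Python) =====
-- def merge_inputs(inputs: dict[str, str], strategy: str = "concat") -> str:
--     """
--     Combine multiple upstream outputs into a single user message.
--
--     concat      — join with double newline (default)
--     interleave  — alternate lines from each source
--     xml_tagged  — wrap each in <source id="..."> tags (best for models that
--                   need to distinguish inputs clearly)
--     """
--     if strategy == "xml_tagged":
--         return "\n".join(f'<source id="{k}">\n{v}\n</source>' for k, v in inputs.items())
--     elif strategy == "interleave":
--         lines = []
--         iters = [iter(v.splitlines()) for v in inputs.values()]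
--         while any(True for it in iters):
--             new_iters = []
--             for it in iters:
--                 try:
--                     lines.append(next(it))
--                     new_iters.append(it)
--                 except StopIteration:
--                     pass
--             iters = new_iters
--         return "\n".join(lines)
--     else:  # concat (default)
--         return "\n\n".join(f"[{k}]\n{v}" for k, v in inputs.items())
-- ===== SOURCE B (Python) =====
-- def merge_inputs(inputs: dict[str, str], strategy: str = "concat") -> str:
--     if strategy == "xml_tagged":
--         return "\n".join(f'<source id="{k}">\n{v}\n</source>' for k, v in inputs.items())
--     if strategy == "interleave":
--         cols = [v.splitlines() for v in inputs.values()]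
--         width = max(map(len, cols), default=0)
--         lines = [col[i] for i in range(width) for col in cols if i < len(col)]
--         return "\n".join(lines)
--     return "\n\n".join(f"[{k}]\n{v}" for k, v in inputs.items())
-- ===== Notes on version B (the rewrite author's own statement) =====
-- stated objective: simpler
-- what changed: The interleave branch's while-loop over a shrinking list of live iterators is replaced by an index-based transpose: split each value into lines once, take the maximum column length, and collect row i of every column that is long enough; concat and xml_tagged branches are unchanged.
import Mathlib
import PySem

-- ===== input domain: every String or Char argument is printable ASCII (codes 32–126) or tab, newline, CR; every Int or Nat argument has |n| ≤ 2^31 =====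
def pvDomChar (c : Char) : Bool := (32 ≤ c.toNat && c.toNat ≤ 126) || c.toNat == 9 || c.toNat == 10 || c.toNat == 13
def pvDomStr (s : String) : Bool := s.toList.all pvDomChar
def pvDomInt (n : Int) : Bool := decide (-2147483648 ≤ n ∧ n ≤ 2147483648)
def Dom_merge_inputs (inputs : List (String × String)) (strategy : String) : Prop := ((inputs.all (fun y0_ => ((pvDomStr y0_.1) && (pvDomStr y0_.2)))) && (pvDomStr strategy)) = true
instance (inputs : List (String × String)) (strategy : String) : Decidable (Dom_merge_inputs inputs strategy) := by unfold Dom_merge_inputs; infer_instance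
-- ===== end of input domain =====

-- B keeps the concat/xml branches but replaces A's shrinking-iterator round-robin for
-- "interleave" by an index-based transpose of the per-source line lists (objective: simpler).

-- ===== PORT A =====
-- measure for A's while loop (each round strictly shrinks it); used only for termination
def pvMeasure (its : List (List String)) : Nat := (its.map List.length).sum + its.length

-- one round's surviving iterators: exhausted ones are dropped, the rest advance
def pvNext (its : List (List String)) : List (List String) :=
  (its.filter (fun l => !l.isEmpty)).map List.tail

theorem pvMeasure_next_le (its : List (List String)) : pvMeasure (pvNext its) ≤ pvMeasure its := by
  induction its with
  | nil => simp [pvMeasure, pvNext]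
  | cons x xs ih =>
    cases x with
    | nil =>
      simp only [pvNext, List.filter_cons, List.isEmpty_nil, Bool.not_true, if_neg,
        Bool.false_eq_true, not_false_iff] at *
      simp only [pvMeasure, List.map_cons, List.sum_cons, List.length_cons, List.length_nil] at *
      omega
    | cons a t =>
      simp only [pvNext, List.filter_cons, List.isEmpty_cons, Bool.not_false, if_pos] at *
      simp only [pvMeasure, List.map_cons, List.sum_cons, List.length_cons, List.tail_cons] at *
      omega

theorem pvMeasure_next_lt (its : List (List String)) (h : ¬ its.isEmpty = true) :
    pvMeasure (pvNext its) < pvMeasure its := by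
  cases its with
  | nil => simp at h
  | cons x xs =>
    have hle := pvMeasure_next_le xs
    cases x with
    | nil =>
      simp only [pvNext, List.filter_cons, List.isEmpty_nil, Bool.not_true, Bool.false_eq_true,
        if_neg, not_false_iff] at *
      simp only [pvMeasure, List.map_cons, List.sum_cons, List.length_cons, List.length_nil] at *
      omega
    | cons a t =>
      simp only [pvNext, List.filter_cons, List.isEmpty_cons, Bool.not_false, if_pos] at *
      simp only [pvMeasure, List.map_cons, List.sum_cons, List.length_cons, List.tail_cons] at *
      omega

-- A's while loop: one round appends the next line of every live iterator, drops exhausted ones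
def pvRound (its : List (List String)) (lines : List String) : List String :=
  if _h : its.isEmpty then lines
  else pvRound (pvNext its) (lines ++ its.filterMap List.head?)
termination_by pvMeasure its
decreasing_by exact pvMeasure_next_lt its _h

def merge_inputs (inputs : List (String × String)) (strategy : String) : String :=
  if strategy = "xml_tagged" then
    PySem.Str.join "\n" (inputs.map (fun kv =>
      "<source id=\"" ++ kv.1 ++ "\">\n" ++ kv.2 ++ "\n</source>"))
  else if strategy = "interleave" then
    PySem.Str.join "\n" (pvRound (inputs.map (fun kv => PySem.Str.splitlines kv.2)) [])
  else
    PySem.Str.join "\n\n" (inputs.map (fun kv => "[" ++ kv.1 ++ "]\n" ++ kv.2))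

-- ===== PORT B =====
def merge_inputs_alt (inputs : List (String × String)) (strategy : String) : String :=
  if strategy = "xml_tagged" then
    PySem.Str.join "\n" (inputs.map (fun kv =>
      "<source id=\"" ++ kv.1 ++ "\">\n" ++ kv.2 ++ "\n</source>"))
  else if strategy = "interleave" then
    let cols := inputs.map (fun kv => PySem.Str.splitlines kv.2)
    -- max(map(len, cols), default=0): for a list of Nat lengths this is the fold of max from 0
    let width := (cols.map List.length).foldl max 0
    -- [col[i] for i in range(width) for col in cols if i < len(col)]
    let lines := ((List.range width).map (fun i => cols.filterMap (fun col => col[i]?))).flatten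
    PySem.Str.join "\n" lines
  else
    PySem.Str.join "\n\n" (inputs.map (fun kv => "[" ++ kv.1 ++ "]\n" ++ kv.2))

-- ===== PRECONDITION & SPEC =====
def Spec_merge_inputs (inputs : List (String × String)) (strategy : String) (out : String) : Prop := out = merge_inputs_alt inputs strategy
instance (inputs : List (String × String)) (strategy : String) (out : String) : Decidable (Spec_merge_inputs inputs strategy out) := by unfold Spec_merge_inputs; infer_instance

-- ===== CLAIM (what is proved, stated in full; the proofs are below) =====
def Claim_equal_merge_inputs : Prop := ∀ (inputs : List (String × String)) (strategy : String), Dom_merge_inputs inputs strategy → Spec_merge_inputs inputs strategy (merge_inputs inputs strategy)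

-- ===== LEMMAS AND PROOFS =====

def pvWidth (its : List (List String)) : Nat := (its.map List.length).foldl max 0

theorem foldl_max_acc (l : List Nat) (a : Nat) : l.foldl max a = max a (l.foldl max 0) := by
  induction l generalizing a with
  | nil => simp
  | cons x xs ih =>
    simp only [List.foldl_cons]
    rw [ih (max a x), ih (max 0 x)]
    omega

theorem pvWidth_cons (x : List String) (xs : List (List String)) :
    pvWidth (x :: xs) = max x.length (pvWidth xs) := by
  simp only [pvWidth, List.map_cons, List.foldl_cons]
  rw [foldl_max_acc _ (max 0 x.length)]
  omega

theorem pvWidth_next (its : List (List String)) : pvWidth (pvNext its) = pvWidth its - 1 := by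
  induction its with
  | nil => simp [pvWidth, pvNext]
  | cons x xs ih =>
    cases x with
    | nil =>
      simp only [pvNext, List.filter_cons, List.isEmpty_nil, Bool.not_true, Bool.false_eq_true,
        if_neg, not_false_iff] at *
      rw [ih, pvWidth_cons]
      simp
    | cons a t =>
      simp only [pvNext, List.filter_cons, List.isEmpty_cons, Bool.not_false, if_pos,
        List.map_cons, List.tail_cons] at *
      rw [pvWidth_cons, pvWidth_cons, ih]
      simp only [List.length_cons]
      omega

theorem pvWidth_zero (its : List (List String)) (h : pvWidth its = 0) :
    ∀ col ∈ its, col = [] := by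
  induction its with
  | nil => simp
  | cons x xs ih =>
    rw [pvWidth_cons] at h
    intro col hc
    rw [List.mem_cons] at hc
    rcases hc with hc | hc
    · subst hc
      cases col with
      | nil => rfl
      | cons a t => simp at h
    · exact ih (by omega) col hc

theorem row_zero (its : List (List String)) :
    its.filterMap (fun col => col[0]?) = its.filterMap List.head? := by
  apply List.filterMap_congr
  intro col _
  cases col <;> rfl

theorem row_succ (its : List (List String)) (i : Nat) :
    its.filterMap (fun col => col[i + 1]?) = (pvNext its).filterMap (fun col => col[i]?) := by
  induction its with
  | nil => rfl
  | cons x xs ih =>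
    cases x with
    | nil =>
      simp only [pvNext, List.filter_cons, List.isEmpty_nil, Bool.not_true, Bool.false_eq_true,
        if_neg, not_false_iff, List.filterMap_cons] at *
      simpa using ih
    | cons a t =>
      simp only [pvNext, List.filter_cons, List.isEmpty_cons, Bool.not_false, if_pos,
        List.map_cons, List.tail_cons, List.filterMap_cons, List.getElem?_cons_succ] at *
      cases t[i]? <;> simp [ih]

def pvRows (its : List (List String)) : List (List String) :=
  (List.range (pvWidth its)).map (fun i => its.filterMap (fun col => col[i]?))

theorem pvRows_step (its : List (List String)) :
    (pvRows its).flatten = its.filterMap List.head? ++ (pvRows (pvNext its)).flatten := by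
  cases hw : pvWidth its with
  | zero =>
    have hall := pvWidth_zero its hw
    have hheads : its.filterMap List.head? = [] := by
      simp only [List.filterMap_eq_nil_iff]
      intro col hc; rw [hall col hc]; rfl
    have hnext : pvNext its = [] := by
      simp only [pvNext, List.map_eq_nil_iff, List.filter_eq_nil_iff]
      intro col hc; rw [hall col hc]; simp
    simp [pvRows, hw, hnext, hheads]
  | succ m =>
    have hw' : pvWidth (pvNext its) = m := by rw [pvWidth_next, hw]; omega
    simp only [pvRows, hw, hw', List.range_succ_eq_map, List.map_cons, List.map_map,
      List.flatten_cons]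
    rw [row_zero]
    congr 1
    apply congrArg
    apply List.map_congr_left
    intro i _
    simp only [Function.comp_apply]
    exact row_succ its i

theorem pvRound_eq (n : Nat) (its : List (List String)) (lines : List String)
    (hn : pvMeasure its ≤ n) :
    pvRound its lines = lines ++ (pvRows its).flatten := by
  induction n generalizing its lines with
  | zero =>
    have hnil : its = [] := by
      cases its with
      | nil => rfl
      | cons x xs => simp [pvMeasure] at hn
    subst hnil
    simp [pvRound, pvRows, pvWidth]
  | succ n ih =>
    by_cases h : its.isEmpty
    · have hnil : its = [] := by simpa [List.isEmpty_iff] using h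
      subst hnil
      simp [pvRound, pvRows, pvWidth]
    · rw [pvRound, dif_neg h]
      rw [ih (pvNext its) _ (by have := pvMeasure_next_lt its h; omega)]
      rw [pvRows_step its, List.append_assoc]

-- ===== VERDICT (by name: the statement is the Claim_ definition above) =====
theorem merge_inputs_spec : Claim_equal_merge_inputs := by
  intro inputs strategy _
  unfold Spec_merge_inputs merge_inputs merge_inputs_alt
  split_ifs with h1 h2
  · rfl
  · rw [pvRound_eq (pvMeasure (inputs.map fun kv => PySem.Str.splitlines kv.2)) _ [] le_rfl]
    simp [pvRows, pvWidth, Function.comp]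
  · rfl
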